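-- pv_equiv track=rewrite | github.com/open-spaced-repetition/fsrs-optimizer | src/fsrs_optimizer/fsrs_optimizer.py | wrap_short_term_ratings
-- ===== SOURCE A (Python) =====
-- def wrap_short_term_ratings(r_history, t_history):
--     result = []
--     in_zero_sequence = False
--
--     for t, r in zip(t_history.split(","), r_history.split(",")):
--         if t in ("-1", "0"):
--             if not in_zero_sequence:
--                 result.append("(")
--                 in_zero_sequence = True
--             result.append(r)
--             result.append(",")
--         else:
--             if in_zero_sequence:
--                 result[-1] = "),"
--                 in_zero_sequence = False
--             result.append(r)
--             result.append(",")
--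
--     if in_zero_sequence:
--         result[-1] = ")"
--     else:
--         result.pop()
--     return "".join(result)
-- ===== SOURCE B (Python) =====
-- def wrap_short_term_ratings(r_history, t_history):
--     # group the zipped (t, r) pairs into maximal runs of same "short-term-ness",
--     # render each run, then join the runs with commas
--     pairs = list(zip(t_history.split(","), r_history.split(",")))
--     parts = []
--     while pairs:
--         z = pairs[0][0] in ("-1", "0")
--         k = 1
--         while k < len(pairs) and (pairs[k][0] in ("-1", "0")) == z:
--             k += 1
--         run = ",".join(r for _, r in pairs[:k])
--         parts.append("(" + run + ")" if z else run)
--         pairs = pairs[k:]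
--     return ",".join(parts)
-- ===== Notes on version B (the rewrite author's own statement) =====
-- stated objective: alternative
-- what changed: Replaces A's stateful token emitter (in_zero_sequence flag plus in-place patching of the trailing token) with a grouping pipeline: split the pairs into maximal runs of same short-term-ness, render each run (parenthesised if short-term), and comma-join the rendered runs.
import Mathlib
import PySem

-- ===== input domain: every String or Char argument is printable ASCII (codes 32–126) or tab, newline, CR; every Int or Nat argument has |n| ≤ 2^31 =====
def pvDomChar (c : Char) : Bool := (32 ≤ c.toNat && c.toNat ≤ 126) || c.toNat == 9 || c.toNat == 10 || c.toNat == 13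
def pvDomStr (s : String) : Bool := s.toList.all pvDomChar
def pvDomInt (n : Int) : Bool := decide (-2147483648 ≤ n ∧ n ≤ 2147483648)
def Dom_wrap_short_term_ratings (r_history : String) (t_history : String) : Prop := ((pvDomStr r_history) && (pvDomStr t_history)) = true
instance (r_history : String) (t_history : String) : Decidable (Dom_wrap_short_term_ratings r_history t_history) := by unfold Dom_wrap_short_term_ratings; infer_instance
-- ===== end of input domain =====

-- B replaces A's stateful token emitter (flag + in-place patch of the trailing token) with a
-- grouping pipeline over maximal runs; same cost, alternative decomposition. Equivalence of the
-- RETURN values is proved on the whole domain (neither program mutates its arguments).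

-- s.split(",") (shared builtin; sep "," is nonempty so Chars.splitOn is exact)
def pySplitComma (s : String) : List String :=
  (PySem.Chars.splitOn s.toList [',']).map String.ofList

-- ===== PORT A =====
def pvStepA (st : List String × Bool) (p : String × String) : List String × Bool :=
  if p.1 == "-1" || p.1 == "0" then
    let res := if st.2 then st.1 else st.1 ++ ["("]
    (res ++ [p.2, ","], true)
  else
    let res := if st.2 then st.1.dropLast ++ ["),"] else st.1
    (res ++ [p.2, ","], false)

def wrap_short_term_ratings (r_history : String) (t_history : String) : String :=
  let pairs := List.zip (pySplitComma t_history) (pySplitComma r_history)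
  let st := pairs.foldl pvStepA ([], false)
  -- final patch: result[-1] = ")" (list nonempty whenever Python reaches it) / result.pop()
  let result := if st.2 then st.1.dropLast ++ [")"] else st.1.dropLast
  PySem.Str.join "" result

-- ===== PORT B =====
def pvIsShort (t : String) : Bool := t == "-1" || t == "0"

-- the outer while loop of B: peel one maximal run off the front per step
def pvRuns : List (String × String) → List String
  | [] => []
  | (t, r) :: rest =>
    let z := pvIsShort t
    let run := r :: (rest.takeWhile (fun p => pvIsShort p.1 == z)).map Prod.snd
    let s := PySem.Str.join "," run
    (if z then "(" ++ s ++ ")" else s) :: pvRuns (rest.dropWhile (fun p => pvIsShort p.1 == z))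
  termination_by l => l.length
  decreasing_by
    simp only [List.length_cons]
    exact Nat.lt_succ_of_le (List.length_dropWhile_le _ _)

def wrap_short_term_ratings_alt (r_history : String) (t_history : String) : String :=
  PySem.Str.join "," (pvRuns (List.zip (pySplitComma t_history) (pySplitComma r_history)))

-- ===== PRECONDITION & SPEC =====
def Spec_wrap_short_term_ratings (r_history : String) (t_history : String) (out : String) : Prop := out = wrap_short_term_ratings_alt r_history t_history
instance (r_history : String) (t_history : String) (out : String) : Decidable (Spec_wrap_short_term_ratings r_history t_history out) := by unfold Spec_wrap_short_term_ratings; infer_instance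

-- ===== CLAIM (what is proved, stated in full; the proofs are below) =====
def Claim_equal_wrap_short_term_ratings : Prop := ∀ (r_history : String) (t_history : String), Dom_wrap_short_term_ratings r_history t_history → Spec_wrap_short_term_ratings r_history t_history (wrap_short_term_ratings r_history t_history)

-- ===== LEMMAS AND PROOFS =====

-- the token stream A emits for the ratings of one run (each rating followed by ",")
def pvFlat (rs : List String) : List String := rs.flatMap (fun r => [r, ","])

theorem pvFlat_cons (r : String) (rs : List String) :
    pvFlat (r :: rs) = r :: "," :: pvFlat rs := rfl

theorem str_eq_of_toList {a b : String} (h : a.toList = b.toList) : a = b := by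
  rw [← String.ofList_toList (s := a), h, String.ofList_toList]

theorem join_nil_eq_flatten (xs : List (List Char)) :
    PySem.Chars.join [] xs = xs.flatten := by
  induction xs with
  | nil => simp [PySem.Chars.join_nil]
  | cons x xs ih =>
    cases xs with
    | nil => simp [PySem.Chars.join_singleton]
    | cons y ys => simp [PySem.Chars.join_cons_cons] at *; simp [ih]

theorem toList_join0 (xs : List String) :
    (PySem.Str.join "" xs).toList = (xs.map String.toList).flatten := by
  rw [PySem.Str.toList_join]
  simp [join_nil_eq_flatten]

-- join "" over A's run tokens minus its trailing "," = B's ",".join of the ratings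
theorem pvFlat_dropLast_join (r : String) (rs : List String) :
    (((pvFlat (r :: rs)).dropLast.map String.toList)).flatten
      = PySem.Chars.join [','] ((r :: rs).map String.toList) := by
  induction rs generalizing r with
  | nil => simp [pvFlat, PySem.Chars.join_singleton]
  | cons r2 rs ih =>
    rw [pvFlat_cons]
    have hne : pvFlat (r2 :: rs) ≠ [] := by rw [pvFlat_cons]; simp
    have : (r :: "," :: pvFlat (r2 :: rs)).dropLast
        = r :: "," :: (pvFlat (r2 :: rs)).dropLast := by
      simp [List.dropLast_cons_of_ne_nil, hne]
    rw [this]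
    simp only [List.map_cons, List.flatten_cons]
    rw [ih r2, PySem.Chars.join_cons_cons]
    simp

theorem pvFlat_join (r : String) (rs : List String) :
    ((pvFlat (r :: rs)).map String.toList).flatten
      = PySem.Chars.join [','] ((r :: rs).map String.toList) ++ [','] := by
  induction rs generalizing r with
  | nil => simp [pvFlat, PySem.Chars.join_singleton]
  | cons r2 rs ih =>
    rw [pvFlat_cons]
    simp only [List.map_cons, List.flatten_cons]
    rw [ih r2, PySem.Chars.join_cons_cons]
    simp

theorem final_nil_true (acc : List String) (r : String) (rs0 : List String) :
    PySem.Str.join "" (acc ++ "(" :: (pvFlat (r :: rs0)).dropLast ++ [")"])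
      = PySem.Str.join "" acc ++ ("(" ++ PySem.Str.join "," (r :: rs0) ++ ")") := by
  apply str_eq_of_toList
  simp only [String.toList_append, PySem.Str.toList_join]
  rw [show ("".toList : List Char) = [] from rfl, show (",".toList : List Char) = [','] from rfl]
  simp only [join_nil_eq_flatten, List.map_append, List.map_cons, List.map_nil,
    List.flatten_append, List.flatten_cons, List.flatten_nil]
  rw [pvFlat_dropLast_join]
  simp

theorem final_nil_false (acc : List String) (r : String) (rs0 : List String) :
    PySem.Str.join "" (acc ++ (pvFlat (r :: rs0)).dropLast)
      = PySem.Str.join "" acc ++ PySem.Str.join "," (r :: rs0) := by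
  apply str_eq_of_toList
  simp only [String.toList_append, PySem.Str.toList_join]
  rw [show ("".toList : List Char) = [] from rfl, show (",".toList : List Char) = [','] from rfl]
  simp only [join_nil_eq_flatten, List.map_append, List.map_cons, List.flatten_append]
  rw [pvFlat_dropLast_join]
  simp

theorem final_cons_true (acc : List String) (r : String) (rs0 : List String) (g2 : String) (gs : List String) :
    PySem.Str.join "" (acc ++ "(" :: ((pvFlat (r :: rs0)).dropLast ++ ["),"]))
        ++ PySem.Str.join "," (g2 :: gs)
      = PySem.Str.join "" acc
        ++ PySem.Str.join "," (("(" ++ PySem.Str.join "," (r :: rs0) ++ ")") :: g2 :: gs) := by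
  apply str_eq_of_toList
  simp only [String.toList_append, PySem.Str.toList_join, List.map_cons, PySem.Chars.join_cons_cons]
  rw [show ("".toList : List Char) = [] from rfl, show (",".toList : List Char) = [','] from rfl]
  simp only [join_nil_eq_flatten, List.map_append, List.map_cons, List.map_nil,
    List.flatten_append, List.flatten_cons, List.flatten_nil]
  rw [pvFlat_dropLast_join]
  simp

theorem final_cons_false (acc : List String) (r : String) (rs0 : List String) (g2 : String) (gs : List String) :
    PySem.Str.join "" (acc ++ pvFlat (r :: rs0)) ++ PySem.Str.join "," (g2 :: gs)
      = PySem.Str.join "" acc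
        ++ PySem.Str.join "," (PySem.Str.join "," (r :: rs0) :: g2 :: gs) := by
  apply str_eq_of_toList
  simp only [String.toList_append, PySem.Str.toList_join, List.map_cons, PySem.Chars.join_cons_cons]
  rw [show ("".toList : List Char) = [] from rfl, show (",".toList : List Char) = [','] from rfl]
  simp only [join_nil_eq_flatten, List.map_append, List.map_cons, List.flatten_append]
  rw [pvFlat_join]
  simp

theorem str_join_singleton (sep g : String) : PySem.Str.join sep [g] = g := by
  apply str_eq_of_toList
  rw [PySem.Str.toList_join]
  simp [PySem.Chars.join_singleton]

-- a maximal short-term run, once started (flag already true)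
theorem foldl_run_true (run : List (String × String)) (acc : List String)
    (h : ∀ p ∈ run, pvIsShort p.1 = true) :
    run.foldl pvStepA (acc, true) = (acc ++ pvFlat (run.map Prod.snd), true) := by
  induction run generalizing acc with
  | nil => simp [pvFlat]
  | cons p run ih =>
    have hp : pvIsShort p.1 = true := h p (by simp)
    have hstep : pvStepA (acc, true) p = (acc ++ [p.2, ","], true) := by
      have hc : (p.1 == "-1" || p.1 == "0") = true := hp
      simp [pvStepA, hc]
    rw [List.foldl_cons, hstep, ih _ (fun q hq => h q (by simp [hq]))]
    simp [pvFlat]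

-- a long-term run (flag false throughout)
theorem foldl_run_false (run : List (String × String)) (acc : List String)
    (h : ∀ p ∈ run, pvIsShort p.1 = false) :
    run.foldl pvStepA (acc, false) = (acc ++ pvFlat (run.map Prod.snd), false) := by
  induction run generalizing acc with
  | nil => simp [pvFlat]
  | cons p run ih =>
    have hp : pvIsShort p.1 = false := h p (by simp)
    have hstep : pvStepA (acc, false) p = (acc ++ [p.2, ","], false) := by
      have hc : (p.1 == "-1" || p.1 == "0") = false := hp
      simp [pvStepA, hc]
    rw [List.foldl_cons, hstep, ih _ (fun q hq => h q (by simp [hq]))]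
    simp [pvFlat]

-- leaving a short-term run: the first long-term step patches the trailing "," to ")," itself
theorem foldl_reset (p : String × String) (rest : List (String × String)) (acc : List String)
    (hp : pvIsShort p.1 = false) :
    (p :: rest).foldl pvStepA (acc, true)
      = (p :: rest).foldl pvStepA (acc.dropLast ++ ["),"], false) := by
  simp only [List.foldl_cons]
  congr 1
  have hc : (p.1 == "-1" || p.1 == "0") = false := hp
  simp [pvStepA, hc]

theorem dropLast_append_cons (l1 : List String) (x : String) (l2 : List String) (h : l2 ≠ []) :
    (l1 ++ x :: l2).dropLast = l1 ++ x :: l2.dropLast := by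
  rw [List.dropLast_append]
  simp [List.dropLast_cons_of_ne_nil, h]

theorem pvRuns_ne_nil (l : List (String × String)) (h : l ≠ []) : pvRuns l ≠ [] := by
  cases l with
  | nil => exact absurd rfl h
  | cons p rest => rw [pvRuns]; simp

-- main invariant: running A's loop + final patch from any accumulated prefix
theorem main_lemma : ∀ (pairs : List (String × String)) (acc : List String), pairs ≠ [] →
    (PySem.Str.join ""
      (if (pairs.foldl pvStepA (acc, false)).2
        then (pairs.foldl pvStepA (acc, false)).1.dropLast ++ [")"]
        else (pairs.foldl pvStepA (acc, false)).1.dropLast))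
    = PySem.Str.join "" acc ++ PySem.Str.join "," (pvRuns pairs) := by
  intro pairs
  induction pairs using pvRuns.induct with
  | case1 => intro acc h; exact absurd rfl h
  | case2 t r rest z ih =>
    intro acc _
    have hz : z = pvIsShort t := rfl
    have hfold : ∀ st : List String × Bool,
        rest.foldl pvStepA st
          = (rest.dropWhile (fun p => pvIsShort p.1 == z)).foldl pvStepA
              ((rest.takeWhile (fun p => pvIsShort p.1 == z)).foldl pvStepA st) := by
      intro st
      conv_lhs => rw [← List.takeWhile_append_dropWhile
        (p := fun p => pvIsShort p.1 == z) (l := rest)]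
      rw [List.foldl_append]
    rw [pvRuns, ← hz, List.foldl_cons, hfold]
    have hall : ∀ p ∈ rest.takeWhile (fun p => pvIsShort p.1 == z), pvIsShort p.1 = z := by
      intro p hp
      exact eq_of_beq (List.mem_takeWhile_imp (p := fun q : String × String => pvIsShort q.1 == z) hp)
    cases hzv : pvIsShort t with
    | true =>
      have hzt : z = true := hz.trans hzv
      rw [hzt] at hall ih ⊢
      have h1 : pvStepA (acc, false) (t, r) = (acc ++ ["(", r, ","], true) := by
        have hc : (t == "-1" || t == "0") = true := hzv
        simp [pvStepA, hc]
      have h2 := foldl_run_true (rest.takeWhile (fun p => pvIsShort p.1 == true))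
        (acc ++ ["(", r, ","]) hall
      rw [h1, h2]
      have hacc : acc ++ ["(", r, ","]
            ++ pvFlat ((rest.takeWhile (fun p => pvIsShort p.1 == true)).map Prod.snd)
          = acc ++ "(" :: pvFlat (r :: (rest.takeWhile (fun p => pvIsShort p.1 == true)).map Prod.snd) := by
        simp [pvFlat_cons]
      have hfne : pvFlat (r :: (rest.takeWhile (fun p => pvIsShort p.1 == true)).map Prod.snd) ≠ [] := by
        rw [pvFlat_cons]; simp
      have hd : (acc ++ "(" :: pvFlat (r :: (rest.takeWhile (fun p => pvIsShort p.1 == true)).map Prod.snd)).dropLast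
          = acc ++ "(" :: (pvFlat (r :: (rest.takeWhile (fun p => pvIsShort p.1 == true)).map Prod.snd)).dropLast := by
        exact dropLast_append_cons _ _ _ hfne
      cases hrw : rest.dropWhile (fun p => pvIsShort p.1 == true) with
      | nil =>
        rw [hacc]
        simp only [List.foldl_nil, reduceIte, hd, pvRuns, str_join_singleton]
        exact final_nil_true acc r _
      | cons p' rest'' =>
        have hne' : rest.dropWhile (fun p => pvIsShort p.1 == true) ≠ [] := by rw [hrw]; simp
        have hp' : pvIsShort p'.1 = false := by
          have hh := List.head_dropWhile_not (fun p : String × String => pvIsShort p.1 == true) hne'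
          have h9 : (rest.dropWhile (fun p : String × String => pvIsShort p.1 == true)).head? = some p' := by
            rw [hrw]; rfl
          have h8 := List.head?_eq_some_head (l := rest.dropWhile (fun p : String × String => pvIsShort p.1 == true)) hne'
          rw [h9] at h8
          rw [← Option.some.inj h8] at hh
          simpa using hh
        have IH := ih (acc ++ "(" :: ((pvFlat (r :: (rest.takeWhile (fun p => pvIsShort p.1 == true)).map Prod.snd)).dropLast ++ ["),"])) hne'
        rw [hrw] at IH
        rw [hacc, foldl_reset p' rest'' _ hp', hd, List.append_assoc, List.cons_append,
          if_pos rfl]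
        cases hg : pvRuns (p' :: rest'') with
        | nil => exact absurd hg (pvRuns_ne_nil _ (by simp))
        | cons g2 gs =>
          rw [hg] at IH
          exact IH.trans (final_cons_true acc r _ g2 gs)
    | false =>
      have hzt : z = false := hz.trans hzv
      rw [hzt] at hall ih ⊢
      have h1 : pvStepA (acc, false) (t, r) = (acc ++ [r, ","], false) := by
        have hc : (t == "-1" || t == "0") = false := hzv
        simp [pvStepA, hc]
      have h2 := foldl_run_false (rest.takeWhile (fun p => pvIsShort p.1 == false))
        (acc ++ [r, ","]) hall
      rw [h1, h2]
      have hacc : acc ++ [r, ","]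
            ++ pvFlat ((rest.takeWhile (fun p => pvIsShort p.1 == false)).map Prod.snd)
          = acc ++ pvFlat (r :: (rest.takeWhile (fun p => pvIsShort p.1 == false)).map Prod.snd) := by
        simp [pvFlat_cons]
      have hfne : pvFlat (r :: (rest.takeWhile (fun p => pvIsShort p.1 == false)).map Prod.snd) ≠ [] := by
        rw [pvFlat_cons]; simp
      have hd : (acc ++ pvFlat (r :: (rest.takeWhile (fun p => pvIsShort p.1 == false)).map Prod.snd)).dropLast
          = acc ++ (pvFlat (r :: (rest.takeWhile (fun p => pvIsShort p.1 == false)).map Prod.snd)).dropLast := by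
        rw [pvFlat_cons]
        rw [dropLast_append_cons acc r ("," :: pvFlat ((rest.takeWhile (fun p => pvIsShort p.1 == false)).map Prod.snd)) (by simp)]
        rw [List.dropLast_cons_of_ne_nil (l := "," :: pvFlat ((rest.takeWhile (fun p => pvIsShort p.1 == false)).map Prod.snd)) (by simp)]
      cases hrw : rest.dropWhile (fun p => pvIsShort p.1 == false) with
      | nil =>
        rw [hacc]
        simp only [List.foldl_nil, hd, pvRuns, str_join_singleton]
        exact final_nil_false acc r _
      | cons p' rest'' =>
        have hne' : rest.dropWhile (fun p => pvIsShort p.1 == false) ≠ [] := by rw [hrw]; simp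
        have IH := ih (acc ++ pvFlat (r :: (rest.takeWhile (fun p => pvIsShort p.1 == false)).map Prod.snd)) hne'
        rw [hrw] at IH
        rw [hacc, if_neg (Bool.false_ne_true)]
        cases hg : pvRuns (p' :: rest'') with
        | nil => exact absurd hg (pvRuns_ne_nil _ (by simp))
        | cons g2 gs =>
          rw [hg] at IH
          exact IH.trans (final_cons_false acc r _ g2 gs)

-- ===== VERDICT (by name: the statement is the Claim_ definition above) =====
theorem wrap_short_term_ratings_spec : Claim_equal_wrap_short_term_ratings := by
  intro r_history t_history _
  unfold Spec_wrap_short_term_ratings wrap_short_term_ratings wrap_short_term_ratings_alt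
  cases hp : List.zip (pySplitComma t_history) (pySplitComma r_history) with
  | nil => simp [PySem.Str.join, PySem.Chars.join_nil, pvRuns]
  | cons p rest =>
    have := main_lemma (p :: rest) [] (by simp)
    simpa [toList_join0] using this
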